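-- pv_equiv track=rewrite | github.com/vlad-marlo/algorithms | school/webium/sozvon/07/b.py | solution
-- ===== SOURCE A (Python) =====
-- def solution(length: int, data: list[int]) -> tuple[int, int]:
--     data = list(map(lambda x: x // 6 + int(x % 6 != 0), data))
--     sm = sum(data[:2*length+1])
--     ans = sm
--     ans2 = sm
--     for i in range(2 * length + 1, len(data)):
--         sm += data[i] - data[i - 2 * length - 1]
--         if sm > ans:
--             ans2 = ans
--             ans = sm
--     return ans, ans2
-- ===== SOURCE B (Python) =====
-- def solution(length, data):
--     w = 2 * length + 1
--     c = [(x + 5) // 6 for x in data]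
--     # prefix sums: p[m] = sum of the first m ceilings
--     p = [0]
--     t = 0
--     for v in c:
--         t += v
--         p.append(t)
--     n = len(c)
--     # all window sums at once (a single full-list window if the list is shorter than w)
--     ws = [b - a for a, b in zip(p, p[w:])] if n >= w else [p[-1]]
--     ans = ans2 = ws[0]
--     for s in ws[1:]:
--         if s > ans:
--             ans2 = ans
--             ans = s
--     return ans, ans2
-- ===== Notes on version B (the rewrite author's own statement) =====
-- stated objective: alternative
-- what changed: Replaces A's incremental sliding-window update with a prefix-sum table: all window sums are materialised via zip(p, p[w:]) in one comprehension and the record/previous-record pair is computed in a separate reduction pass; Pre_ restricts to length >= 0, the natural domain, since A raises IndexError on every negative length.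
import Mathlib
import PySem

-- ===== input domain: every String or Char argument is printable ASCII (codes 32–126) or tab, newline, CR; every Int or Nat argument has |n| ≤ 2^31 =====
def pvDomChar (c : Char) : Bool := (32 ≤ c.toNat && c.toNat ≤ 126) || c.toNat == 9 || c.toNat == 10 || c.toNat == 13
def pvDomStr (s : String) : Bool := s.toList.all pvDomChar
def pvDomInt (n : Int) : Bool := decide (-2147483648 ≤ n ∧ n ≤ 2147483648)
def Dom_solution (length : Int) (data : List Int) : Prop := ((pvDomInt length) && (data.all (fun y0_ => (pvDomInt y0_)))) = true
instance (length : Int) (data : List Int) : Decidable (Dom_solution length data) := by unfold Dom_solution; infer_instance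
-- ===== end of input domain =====

-- B replaces A's incremental sliding-window update by a prefix-sum table (all window sums
-- materialised at once) followed by a separate record/previous-record reduction pass;
-- equivalence is proved on length ≥ 0 (A raises IndexError on every negative length).

-- ===== PORT A =====
-- x // 6 + int(x % 6 != 0)
def pyCeil6 (x : Int) : Int :=
  PySem.Int.floordiv x 6 + (if PySem.Int.mod x 6 ≠ 0 then 1 else 0)

-- the body of A's for-loop (state = (sm, ans, ans2))
def stepA (d : List Int) (length : Int) (st : Int × Int × Int) (i : Int) : Int × Int × Int :=
  let sm' := st.1 + PySem.List.pyGetD d i 0 - PySem.List.pyGetD d (i - 2 * length - 1) 0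
  if sm' > st.2.1 then (sm', sm', st.2.1) else (sm', st.2.1, st.2.2)

def solution (length : Int) (data : List Int) : Int × Int :=
  let d := data.map pyCeil6
  let sm := (PySem.List.slice d none (some (2 * length + 1))).sum
  let r := (PySem.List.pyRange (2 * length + 1) (d.length : Int) 1).foldl (stepA d length) (sm, sm, sm)
  (r.2.1, r.2.2)

-- ===== PORT B =====
-- (x + 5) // 6
def ceilDiv6 (x : Int) : Int := PySem.Int.floordiv (x + 5) 6

-- one iteration of Source B's prefix loop (state = (p, t))
def prefixStep (st : List Int × Int) (v : Int) : List Int × Int :=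
  (st.1 ++ [st.2 + v], st.2 + v)

-- the body of Source B's reduction loop (state = (ans, ans2))
def stepB (st : Int × Int) (s : Int) : Int × Int :=
  if s > st.1 then (s, st.1) else st

def solution_alt (length : Int) (data : List Int) : Int × Int :=
  let w := 2 * length + 1
  let c := data.map ceilDiv6
  let p := (c.foldl prefixStep ([0], 0)).1
  let n := c.length
  let ws := if w ≤ (n : Int) then
              (p.zip (PySem.List.slice p (some w) none)).map (fun ab => ab.2 - ab.1)
            else [PySem.List.pyGetD p (-1) 0]
  let a0 := PySem.List.pyGetD ws 0 0
  (PySem.List.slice ws (some 1) none).foldl stepB (a0, a0)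

-- ===== PRECONDITION & SPEC =====
-- Pre_ restricts to the natural domain length ≥ 0: A raises IndexError on EVERY negative
-- length (the loop always reaches data[i - 2*length - 1] with an index ≥ len(data)).
def Pre_solution (length : Int) (data : List Int) : Prop := 0 ≤ length
instance (length : Int) (data : List Int) : Decidable (Pre_solution length data) := by
  unfold Pre_solution; infer_instance

def pvWitness_solution : Int × List Int := (1, [7, 2, 13, 0, 6])

def Spec_solution (length : Int) (data : List Int) (out : Int × Int) : Prop := out = solution_alt length data
instance (length : Int) (data : List Int) (out : Int × Int) : Decidable (Spec_solution length data out) := by unfold Spec_solution; infer_instance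

-- ===== CLAIM (what is proved, stated in full; the proofs are below) =====
def Claim_equal_solution : Prop := ∀ (length : Int) (data : List Int), Dom_solution length data → Pre_solution length data → Spec_solution length data (solution length data)

-- ===== LEMMAS AND PROOFS =====

-- P c m = sum of the first m ceilings; S c wn k = the k-th window sum (window size wn)
def P (c : List Int) (m : Nat) : Int := (c.take m).sum
def S (c : List Int) (wn : Nat) (k : Nat) : Int := P c (k + wn) - P c k

lemma ceil_eq (x : Int) : pyCeil6 x = ceilDiv6 x := by
  unfold pyCeil6 ceilDiv6
  rw [PySem.Int.floordiv_eq_ediv_of_pos (by omega), PySem.Int.floordiv_eq_ediv_of_pos (by omega),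
      PySem.Int.mod_eq_emod_of_pos (by omega)]
  split_ifs with h <;> omega

lemma P_succ (c : List Int) (m : Nat) (h : m < c.length) :
    P c (m + 1) = P c m + c.getD m 0 := by
  unfold P
  rw [List.take_add_one, List.sum_append, List.getElem?_eq_getElem h]
  simp [List.getD_eq_getElem?_getD, List.getElem?_eq_getElem h]

lemma prefix_fold (c : List Int) : ∀ (ps : List Int) (t : Int),
    c.foldl prefixStep (ps, t)
      = (ps ++ (List.range c.length).map (fun m => t + (c.take (m + 1)).sum), t + c.sum) := by
  induction c with
  | nil => simp
  | cons v c ih =>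
    intro ps t
    rw [List.foldl_cons]
    show List.foldl prefixStep (ps ++ [t + v], t + v) c = _
    rw [ih]
    simp only [List.length_cons, List.range_succ_eq_map, List.map_cons, List.map_map]
    simp [List.take_succ_cons, Function.comp, add_assoc]

lemma prefix_char (c : List Int) :
    (c.foldl prefixStep ([0], 0)).1 = (List.range (c.length + 1)).map (P c) := by
  rw [prefix_fold]
  simp [List.range_succ_eq_map, List.map_map, Function.comp, P]

lemma drop_one_map_range {α : Type} (f : Nat → α) (m : Nat) :
    (((List.range (m + 1)).map f).drop 1) = (List.range m).map (fun j => f (j + 1)) := by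
  simp [List.range_succ_eq_map, List.map_map, Function.comp, Nat.succ_eq_add_one]

lemma pyRange_one_nil (a b : Int) (h : b ≤ a) : PySem.List.pyRange a b 1 = [] := by
  simp [PySem.List.pyRange]; omega

lemma windows_eq (c : List Int) (wn : Nat) (hw : wn ≤ c.length) :
    (((List.range (c.length + 1)).map (P c)).zip
        (((List.range (c.length + 1)).map (P c)).drop wn)).map (fun ab => ab.2 - ab.1)
      = (List.range (c.length - wn + 1)).map (S c wn) := by
  apply List.ext_getElem
  · simp; omega
  · intro i h1 h2
    simp only [List.getElem_map, List.getElem_zip, List.getElem_drop, List.getElem_range, S]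
    have e1 : wn + i = i + wn := by omega
    rw [e1]

lemma loopA (c : List Int) (length : Int) (wn : Nat) (hwn : (wn : Int) = 2 * length + 1) :
    ∀ (m k : Nat) (a a2 : Int), wn + k + m = c.length →
    (PySem.List.pyRange ((wn : Int) + (k : Int)) (c.length : Int) 1).foldl
        (stepA c length) (S c wn k, a, a2)
      = (S c wn (k + m), ((List.range m).map (fun j => S c wn (k + 1 + j))).foldl stepB (a, a2)) := by
  intro m
  induction m with
  | zero =>
    intro k a a2 h
    rw [pyRange_one_nil _ _ (by omega)]
    simp
  | succ m ih =>
    intro k a a2 h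
    rw [PySem.List.pyRange_one_cons (by omega)]
    rw [List.foldl_cons]
    have hidx : ((wn : Int) + (k : Int) - 2 * length - 1) = ((k : Nat) : Int) := by omega
    have hcast : ((wn : Int) + (k : Int)) = (((wn + k : Nat)) : Int) := by push_cast; ring
    have hS : S c wn k + c.getD (wn + k) 0 - c.getD k 0 = S c wn (k + 1) := by
      have e1 : k + 1 + wn = (k + wn) + 1 := by omega
      have e2 : k + wn = wn + k := by omega
      simp only [S, e1, e2]
      rw [P_succ c (wn + k) (by omega), P_succ c k (by omega)]
      ring
    have hstep : stepA c length (S c wn k, a, a2) ((wn : Int) + (k : Int))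
        = (S c wn (k + 1), stepB (a, a2) (S c wn (k + 1))) := by
      simp only [stepA, stepB]
      rw [hcast] at hidx ⊢
      simp only [hidx, PySem.List.pyGetD_natCast, hS]
      split_ifs <;> rfl
    rw [hstep]
    have hc2 : ((wn : Int) + (k : Int)) + 1 = ((wn : Int) + ((k + 1 : Nat) : Int)) := by push_cast; ring
    rw [hc2, ih (k + 1) _ _ (by omega)]
    have e3 : k + (m + 1) = k + 1 + m := by omega
    have hl : (List.range m).map ((fun j => S c wn (k + 1 + j)) ∘ Nat.succ)
        = (List.range m).map (fun j => S c wn (k + 1 + 1 + j)) := by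
      apply List.map_congr_left
      intro j _
      simp only [Function.comp]
      congr 1
      omega
    rw [e3, List.range_succ_eq_map]
    simp only [List.map_cons, List.foldl_cons, List.map_map, Nat.add_zero, hl]

lemma main_eq (length : Int) (data : List Int) (hl : 0 ≤ length) :
    solution length data = solution_alt length data := by
  unfold solution solution_alt
  dsimp only
  have hd : data.map pyCeil6 = data.map ceilDiv6 := List.map_congr_left (fun x _ => ceil_eq x)
  rw [hd]
  set c := data.map ceilDiv6 with hc
  set n := c.length with hn
  have hw0 : (0:Int) ≤ 2 * length + 1 := by omega
  set wn := (2 * length + 1).toNat with hwdef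
  have hwn : (wn : Int) = 2 * length + 1 := Int.toNat_of_nonneg hw0
  have hwpos : 1 ≤ wn := by omega
  have hp1 : (c.foldl prefixStep ([0], 0)).1 = (List.range (n + 1)).map (P c) := prefix_char c
  have hslice : PySem.List.slice c none (some (2 * length + 1)) = c.take wn := by
    rw [PySem.List.slice_to (xs := c) hw0]
  have hS0 : S c wn 0 = (c.take wn).sum := by simp [S, P]
  by_cases hcase : (2 * length + 1) ≤ (n : Int)
  · -- at least one full window
    have hwle : wn ≤ n := by omega
    have hrange : (2 * length + 1) = ((wn : Int) + ((0:Nat) : Int)) := by push_cast; omega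
    rw [hslice, hp1, if_pos hcase, hrange, ← hS0,
        loopA c length wn hwn (n - wn) 0 _ _ (by omega)]
    rw [PySem.List.slice_from (xs := (List.range (n + 1)).map (P c)) (by push_cast; omega)]
    have htn : ((wn : Int) + ((0:Nat) : Int)).toNat = wn := by omega
    rw [htn, windows_eq c wn hwle]
    have hws0 : PySem.List.pyGetD ((List.range (n - wn + 1)).map (S c wn)) 0 0 = S c wn 0 := by
      rw [List.range_succ_eq_map]
      simp [PySem.List.pyGetD_zero]
    have hdrop : PySem.List.slice ((List.range (n - wn + 1)).map (S c wn)) (some 1) none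
        = (List.range (n - wn)).map (fun j => S c wn (j + 1)) := by
      rw [PySem.List.slice_from_one]
      have h2 := drop_one_map_range (S c wn) (n - wn)
      simpa using h2
    rw [hws0, hdrop, hS0]
    have hmaps : (List.range (n - wn)).map (fun j => S c wn (0 + 1 + j))
        = (List.range (n - wn)).map (fun j => S c wn (j + 1)) := by
      apply List.map_congr_left
      intro j _
      congr 1
      omega
    rw [hmaps]
  · -- the list is shorter than one window
    have htake : c.take wn = c := List.take_of_length_le (by omega)
    rw [hslice, htake, if_neg hcase, pyRange_one_nil _ _ (by omega), hp1]
    have hlast : PySem.List.pyGetD ((List.range (n + 1)).map (P c)) (-1) 0 = c.sum := by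
      rw [PySem.List.pyGetD_neg_ofNat ((List.range (n + 1)).map (P c)) 1 0 (by omega) (by simp)]
      simp only [P, List.length_map, List.length_range, Nat.add_sub_cancel, List.getElem_map,
        List.getElem_range, hn, List.take_length]
    rw [hlast]
    simp [PySem.List.slice_from_one, PySem.List.pyGetD_zero]

-- ===== VERDICT (by name: the statement is the Claim_ definition above) =====
theorem solution_spec : Claim_equal_solution := by
  intro length data _ hp
  unfold Spec_solution
  exact main_eq length data hp
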